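-- pv_equiv track=rewrite | github.com/thoppe/The-Pile-CoastalZoneInformation | P5_KL_filter.py | compute
-- ===== SOURCE A (Python) =====
-- import collections
--
-- def compute_bigrams(text):
--     cx = collections.Counter()
--     pairs = [x0 + x1 for x0, x1 in zip(text, text[1:])]
--     cx.update(pairs)
--     return cx
--
-- def compute(js):
--     line_cx = collections.Counter()
--     text = js["text"]
--
--     for line in text.split("\n"):
--         if not line:
--             continue
--
--         line_cx.update(compute_bigrams(line))
--
--     return line_cx
-- ===== SOURCE B (Python) =====
-- import collections
--
-- def compute(js):
--     cx = collections.Counter()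
--     prev = None
--     for c in js["text"]:
--         if c == "\n":
--             prev = None
--         else:
--             if prev is not None:
--                 cx[prev + c] += 1
--             prev = c
--     return cx
-- ===== Notes on version B (the rewrite author's own statement) =====
-- stated objective: alternative
-- what changed: B replaces split-into-lines plus per-line pair-list/Counter construction and Counter.update merging with one streaming pass over the text keeping only the previous character (reset at newlines) and incrementing one global Counter.
import Mathlib
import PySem

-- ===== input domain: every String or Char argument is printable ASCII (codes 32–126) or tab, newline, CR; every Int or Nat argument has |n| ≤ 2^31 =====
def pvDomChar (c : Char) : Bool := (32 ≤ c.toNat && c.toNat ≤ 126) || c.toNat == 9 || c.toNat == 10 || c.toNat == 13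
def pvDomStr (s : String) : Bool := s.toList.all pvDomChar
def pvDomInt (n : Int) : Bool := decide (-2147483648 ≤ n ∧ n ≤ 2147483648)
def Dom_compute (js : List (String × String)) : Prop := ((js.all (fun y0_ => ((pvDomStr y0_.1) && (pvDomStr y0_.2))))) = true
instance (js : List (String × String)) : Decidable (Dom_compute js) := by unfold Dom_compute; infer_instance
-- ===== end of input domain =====

-- B replaces line-splitting + per-line pair lists/Counters merged by Counter.update with a single
-- streaming pass keeping the previous character (reset at '\n') and one global counter (alternative decomposition).


-- ===== PORT A =====
-- pairs = [x0 + x1 for x0, x1 in zip(text, text[1:])]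
def pvPairs (l : List Char) : List String :=
  (l.zip (PySem.List.slice l (some 1) none)).map (fun p => String.ofList [p.1, p.2])

-- compute_bigrams: cx = Counter(); cx.update(pairs); return cx
def computeBigrams (line : List Char) : PySem.Dict String Int :=
  PySem.Dict.counter (pvPairs line)

-- Counter.update(other_counter): for k, c in other.items(): self[k] = self.get(k, 0) + c
def pvCounterUpdate (d c : PySem.Dict String Int) : PySem.Dict String Int :=
  c.items.foldl (fun d p => d.modify p.1 0 (· + p.2)) d

def compute (js : List (String × String)) : List (String × Int) :=
  match (PySem.Dict.mk js).get? "text" with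
  | none => []   -- js["text"] raises KeyError: excluded by Pre_compute
  | some text =>
    ((PySem.Chars.splitOn text.toList ['\n']).foldl
      (fun cx line => if line.isEmpty then cx else pvCounterUpdate cx (computeBigrams line))
      PySem.Dict.empty).items

-- ===== PORT B =====
def pvStep (st : Option Char × PySem.Dict String Int) (c : Char) :
    Option Char × PySem.Dict String Int :=
  if c = '\n' then (none, st.2)
  else (some c,
    match st.1 with
    | some p => st.2.modify (String.ofList [p, c]) 0 (· + 1)
    | none => st.2)

def compute_alt (js : List (String × String)) : List (String × Int) :=
  match (PySem.Dict.mk js).get? "text" with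
  | none => []   -- js["text"] raises KeyError: excluded by Pre_compute
  | some text =>
    ((text.toList.foldl pvStep (none, PySem.Dict.empty)).2).items

-- ===== PRECONDITION & SPEC =====
-- Pre excludes dicts without key "text", where A raises KeyError.
def Pre_compute (js : List (String × String)) : Prop :=
  (PySem.Dict.mk js).contains "text" = true
instance (js : List (String × String)) : Decidable (Pre_compute js) := by
  unfold Pre_compute; infer_instance
def pvWitness_compute : (List (String × String)) := [("text", "ab\ncd")]

def Spec_compute (js : List (String × String)) (out : List (String × Int)) : Prop := out = compute_alt js
instance (js : List (String × String)) (out : List (String × Int)) : Decidable (Spec_compute js out) := by unfold Spec_compute; infer_instance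

-- ===== CLAIM (what is proved, stated in full; the proofs are below) =====
def Claim_equal_compute : Prop := ∀ (js : List (String × String)), Dom_compute js → Pre_compute js → Spec_compute js (compute js)

-- ===== LEMMAS AND PROOFS =====

-- increment the counter once per listed bigram
def pvInc (d : PySem.Dict String Int) (l : List String) : PySem.Dict String Int :=
  l.foldl (fun d x => d.modify x 0 (· + 1)) d

-- the bigram stream B reads, as a function of the prev state
def pvBg : Option Char → List Char → List String
  | _, [] => []
  | prev, c :: r =>
    if c = '\n' then pvBg none r
    else (match prev with | some p => [String.ofList [p, c]] | none => []) ++ pvBg (some c) r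

-- split on '\n' as plain structural recursion: (first line, remaining lines)
def pvSplitP : List Char → List Char × List (List Char)
  | [] => ([], [])
  | c :: r =>
    let pr := pvSplitP r
    if c = '\n' then ([], pr.1 :: pr.2) else (c :: pr.1, pr.2)

def pvExt : Option Char → List Char → List Char
  | none, h => h
  | some p, h => p :: h

theorem pvB_fold (s : List Char) : ∀ (prev : Option Char) (d : PySem.Dict String Int),
    (s.foldl pvStep (prev, d)).2 = pvInc d (pvBg prev s) := by
  induction s with
  | nil => intro prev d; simp [pvBg, pvInc]
  | cons c r ih =>
    intro prev d
    by_cases hc : c = '\n'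
    · simp [pvStep, pvBg, hc, ih]
    · cases prev with
      | none => simp [pvStep, pvBg, hc, ih]
      | some p => simp [pvStep, pvBg, hc, ih, pvInc]

theorem pvSplitOn_go (fuel : Nat) : ∀ (l cur : List Char) (acc : List (List Char)),
    l.length < fuel →
    PySem.Chars.splitOn.go ['\n'] fuel l cur acc
      = acc.reverse ++ ((cur.reverse ++ (pvSplitP l).1) :: (pvSplitP l).2) := by
  induction fuel with
  | zero => intro l cur acc h; omega
  | succ n ih =>
    intro l cur acc h
    cases l with
    | nil => simp [PySem.Chars.splitOn.go, pvSplitP]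
    | cons c rest =>
      by_cases hc : c = '\n'
      · subst hc
        rw [PySem.Chars.splitOn.go]
        simp only [List.isPrefixOf, List.length_cons] at *
        rw [if_pos (by simp)]
        simp only [List.length_nil, List.drop]
        rw [ih rest [] _ (by omega)]
        simp [pvSplitP]
      · rw [PySem.Chars.splitOn.go]
        rw [if_neg (by simp [List.isPrefixOf]; exact fun h => absurd h.symm hc),
          ih rest (c :: cur) _ (by simp at h; omega)]
        simp [pvSplitP, hc]

theorem pvSplitOn_eq (s : List Char) :
    PySem.Chars.splitOn s ['\n'] = (pvSplitP s).1 :: (pvSplitP s).2 := by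
  rw [PySem.Chars.splitOn, pvSplitOn_go (s.length + 1) s [] [] (by omega)]
  simp

theorem pvPairs_nil : pvPairs [] = [] := rfl

theorem pvPairs_single (a : Char) : pvPairs [a] = [] := by
  simp [pvPairs, PySem.List.slice_from (xs := [a]) (a := 1) (by omega)]

theorem pvPairs_cons (a b : Char) (l : List Char) :
    pvPairs (a :: b :: l) = String.ofList [a, b] :: pvPairs (b :: l) := by
  unfold pvPairs
  rw [PySem.List.slice_from _ (by omega : (0:Int) ≤ 1), PySem.List.slice_from _ (by omega : (0:Int) ≤ 1)]
  simp

theorem pvBg_eq (s : List Char) : ∀ prev,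
    pvBg prev s = pvPairs (pvExt prev (pvSplitP s).1)
      ++ ((pvSplitP s).2.map pvPairs).flatten := by
  induction s with
  | nil => intro prev; cases prev <;> simp [pvBg, pvSplitP, pvExt, pvPairs_nil, pvPairs_single]
  | cons c r ih =>
    intro prev
    by_cases hc : c = '\n'
    · subst hc
      simp only [pvBg, if_pos rfl, pvSplitP, ih none]
      cases prev <;> simp [pvExt, pvPairs_nil, pvPairs_single]
    · simp only [pvBg, if_neg hc, pvSplitP, ih (some c)]
      cases prev with
      | none => simp [pvExt, hc]
      | some p => simp [pvExt, hc, pvPairs_cons]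

theorem pvGetD_pairFold (ps : List (String × Int)) : ∀ (d : PySem.Dict String Int) (v : String),
    (ps.foldl (fun d p => d.modify p.1 0 (· + p.2)) d).getD v 0
      = d.getD v 0 + ((ps.filter (fun p => p.1 == v)).map (·.2)).sum := by
  induction ps with
  | nil => simp
  | cons p ps ih =>
    intro d v
    simp only [List.foldl_cons, ih, List.filter_cons]
    by_cases h : p.1 = v
    · rw [PySem.Dict.getD_modify]
      simp [h.symm, add_assoc, add_comm, add_left_comm]
    · rw [PySem.Dict.getD_modify, if_neg (fun hv => h hv.symm),
        if_neg (by simpa using h)]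

theorem pvInc_keys (d : PySem.Dict String Int) (l : List String) :
    (pvInc d l).keys = PySem.Set.update d.keys l := by
  unfold pvInc
  exact PySem.Dict.keys_foldl_modify l 0 (fun _ _ => (· + 1)) d

theorem pvUpdate_counter (l : List String) (d : PySem.Dict String Int)
    (hnd : d.keys.Nodup) : pvCounterUpdate d (PySem.Dict.counter l) = pvInc d l := by
  have hmapfst : (PySem.Dict.counter l).items.map Prod.fst = PySem.Set.ofList l := by
    have h := PySem.Dict.keys_counter (xs := l)
    simpa [PySem.Dict.keys] using h
  have hkL : (pvCounterUpdate d (PySem.Dict.counter l)).keys = PySem.Set.update d.keys l := by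
    unfold pvCounterUpdate
    rw [PySem.Dict.keys_foldl_modify_key _ Prod.fst 0 (fun _ p => (· + p.2)), hmapfst,
      PySem.Set.update_eq_append_filter, PySem.Set.update_eq_append_filter,
      PySem.Set.ofList_ofList]
  have hget : ∀ v, (pvCounterUpdate d (PySem.Dict.counter l)).getD v 0 = (pvInc d l).getD v 0 := by
    intro v
    unfold pvCounterUpdate pvInc
    rw [pvGetD_pairFold, PySem.Dict.getD_foldl_modify_add_one, PySem.Dict.items_counter,
      List.filter_map]
    have hcomp : ((fun p => p.1 == v) ∘ fun k => ((k, (List.count k l : Int)) : String × Int))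
        = fun k => k == v := rfl
    rw [hcomp]
    by_cases hv : v ∈ l
    · have hv' : v ∈ PySem.Set.ofList l := (PySem.Set.mem_ofList l v).mpr hv
      have hfil : (PySem.Set.ofList l).filter (fun k => k == v) = [v] := by
        have h1 := List.filter_eq (l := PySem.Set.ofList l) v
        have h2 : List.count v (PySem.Set.ofList l) = 1 :=
          List.count_eq_one_of_mem (PySem.Set.nodup_ofList l) hv'
        simpa [h2] using h1
      simp [hfil]
    · have hv' : v ∉ PySem.Set.ofList l := fun h => hv ((PySem.Set.mem_ofList l v).mp h)
      have hfil : (PySem.Set.ofList l).filter (fun k => k == v) = [] := by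
        rw [List.filter_eq_nil_iff]
        intro a ha hav
        exact hv' ((beq_iff_eq.mp hav) ▸ ha)
      simp [hfil, List.count_eq_zero_of_not_mem hv]
  have hnL : (pvCounterUpdate d (PySem.Dict.counter l)).keys.Nodup := by
    rw [hkL]; exact PySem.Set.nodup_update _ _ hnd
  have hnR : (pvInc d l).keys.Nodup := by
    rw [pvInc_keys]; exact PySem.Set.nodup_update _ _ hnd
  apply PySem.Dict.ext
  rw [PySem.Dict.items_eq_map_keys _ hnL 0, PySem.Dict.items_eq_map_keys _ hnR 0, hkL, pvInc_keys]
  exact List.map_congr_left (fun k _ => by rw [hget k])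

theorem pvA_fold (lines : List (List Char)) : ∀ (d : PySem.Dict String Int), d.keys.Nodup →
    lines.foldl (fun cx line => if line.isEmpty then cx
        else pvCounterUpdate cx (computeBigrams line)) d
      = pvInc d ((lines.map pvPairs).flatten) := by
  induction lines with
  | nil => intro d _; simp [pvInc]
  | cons line t ih =>
    intro d hnd
    simp only [List.foldl_cons, List.map_cons, List.flatten_cons]
    have happ : ∀ (a b : List String), pvInc d (a ++ b) = pvInc (pvInc d a) b := by
      intro a b; unfold pvInc; exact List.foldl_append
    by_cases hl : line.isEmpty
    · have hline : line = [] := List.isEmpty_iff.mp hl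
      rw [if_pos hl, ih d hnd, hline]
      simp [pvPairs_nil, pvInc]
    · rw [if_neg hl, computeBigrams, pvUpdate_counter _ _ hnd, happ,
        ih _ (by rw [pvInc_keys]; exact PySem.Set.nodup_update _ _ hnd)]

-- ===== VERDICT (by name: the statement is the Claim_ definition above) =====
theorem compute_spec : Claim_equal_compute := by
  intro js _ hpre
  unfold Spec_compute compute compute_alt
  unfold Pre_compute at hpre
  rw [PySem.Dict.contains_eq_isSome_get?] at hpre
  cases hget : (PySem.Dict.mk js).get? "text" with
  | none => simp [hget] at hpre
  | some text =>
    dsimp only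
    rw [pvSplitOn_eq, pvA_fold _ _ PySem.Dict.nodup_keys_empty, pvB_fold, pvBg_eq]
    simp [pvExt]
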